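-- pv_equiv track=rewrite | github.com/TImeTable-GEHU/TimeTable-BE | Constants/section_allocation.py | divide_students_into_sections
-- ===== SOURCE A (Python) =====
-- from collections import defaultdict
-- from typing import List, Dict
--
-- def divide_students_into_sections(students: List[Dict], class_strength: int) -> List[List[Dict]]:
--     """
--     Divide students into sections based on their scores and class strength.
--
--     Args:
--         students (List[Dict]): List of student dictionaries with scores.
--         class_strength (int): Maximum number of students per section.
--
--     Returns:
--         List[List[Dict]]: List of sections containing students.
--     """
--     grouped_by_score = defaultdict(list)
--     for student in students:
--         grouped_by_score[student['score']].append(student)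
--
--     sections = []
--     current_section = []
--
--     for score_group in grouped_by_score.values():
--         for student in score_group:
--             current_section.append(student)
--             if len(current_section) == class_strength:
--                 sections.append(current_section)
--                 current_section = []
--
--     if current_section:
--         sections.append(current_section)
--
--     return sections
-- ===== SOURCE B (Python) =====
-- def divide_students_into_sections(students, class_strength):
--     groups = {}
--     for student in students:
--         groups.setdefault(student['score'], []).append(student)
--     ordered = [s for group in groups.values() for s in group]
--     if class_strength <= 0:
--         return [ordered] if ordered else []
--     return [ordered[i:i + class_strength] for i in range(0, len(ordered), class_strength)]
-- ===== Notes on version B (the rewrite author's own statement) =====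
-- stated objective: simpler
-- what changed: The reset-on-full accumulator loop is replaced by flattening the score groups into one ordered list and splitting it with index slicing over range(0, len, class_strength); non-positive class_strength naturally means 'no size limit', i.e. one section, which coincides with A's behaviour.
import Mathlib
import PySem

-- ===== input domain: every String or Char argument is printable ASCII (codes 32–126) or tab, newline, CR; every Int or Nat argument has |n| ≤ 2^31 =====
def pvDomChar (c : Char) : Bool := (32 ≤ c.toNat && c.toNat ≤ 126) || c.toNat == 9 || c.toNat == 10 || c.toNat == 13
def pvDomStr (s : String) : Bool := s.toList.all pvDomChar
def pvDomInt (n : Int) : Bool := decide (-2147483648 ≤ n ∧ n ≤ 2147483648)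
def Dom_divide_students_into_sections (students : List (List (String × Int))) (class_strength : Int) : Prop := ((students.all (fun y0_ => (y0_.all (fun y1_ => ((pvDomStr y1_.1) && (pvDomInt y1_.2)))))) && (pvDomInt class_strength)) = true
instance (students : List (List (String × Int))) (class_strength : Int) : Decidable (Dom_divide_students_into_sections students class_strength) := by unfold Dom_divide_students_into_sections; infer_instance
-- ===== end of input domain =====

-- B replaces A's reset-on-full accumulator loop with flatten-then-slice chunking (same cost); equivalence proved on inputs where every student record has a 'score' key.

-- ===== PORT A =====
-- shared by both ports: the score-grouping loop both Pythons begin with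
-- (defaultdict(list) append in A, dict.setdefault append in B — the same fold);
-- student['score'] is read with default 0, exact under Pre_ (key present).
def pvGroupByScore (students : List (List (String × Int))) :
    PySem.Dict Int (List (List (String × Int))) :=
  students.foldl
    (fun d student =>
      d.modify ((PySem.Dict.get? (PySem.Dict.mk student) "score").getD 0) [] (· ++ [student]))
    PySem.Dict.empty

def divide_students_into_sections (students : List (List (String × Int))) (class_strength : Int) : List (List (List (String × Int))) :=
  let grouped_by_score := pvGroupByScore students
  let st :=
    (PySem.Dict.values grouped_by_score).foldl
      (fun acc score_group =>
        score_group.foldl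
          (fun acc student =>
            if (((acc.2 ++ [student]).length : Int) = class_strength) then
              (acc.1 ++ [acc.2 ++ [student]], ([] : List (List (String × Int))))
            else
              (acc.1, acc.2 ++ [student]))
          acc)
      (([], []) : List (List (List (String × Int))) × List (List (String × Int)))
  if st.2 = [] then st.1 else st.1 ++ [st.2]

-- ===== PORT B =====
def divide_students_into_sections_alt (students : List (List (String × Int))) (class_strength : Int) : List (List (List (String × Int))) :=
  let groups := pvGroupByScore students
  let ordered := (PySem.Dict.values groups).flatten
  if class_strength ≤ 0 then
    (if ordered = [] then [] else [ordered])
  else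
    (PySem.List.pyRange 0 (PySem.List.len ordered) class_strength).map
      (fun i => PySem.List.slice ordered (some i) (some (i + class_strength)))

-- ===== PRECONDITION & SPEC =====
-- Pre_ excludes exactly the inputs where a student record has no 'score' key: there
-- the Python A (and B) raises KeyError on student['score'].
def Pre_divide_students_into_sections (students : List (List (String × Int))) (class_strength : Int) : Prop :=
  ∀ student ∈ students, (PySem.Dict.mk student).contains "score" = true
instance (students : List (List (String × Int))) (class_strength : Int) : Decidable (Pre_divide_students_into_sections students class_strength) := by unfold Pre_divide_students_into_sections; infer_instance

def pvWitness_divide_students_into_sections : (List (List (String × Int))) × Int :=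
  ([[("score", 1), ("id", 7)], [("score", 2)], [("score", 1)]], 2)

def Spec_divide_students_into_sections (students : List (List (String × Int))) (class_strength : Int) (out : List (List (List (String × Int)))) : Prop := out = divide_students_into_sections_alt students class_strength
instance (students : List (List (String × Int))) (class_strength : Int) (out : List (List (List (String × Int)))) : Decidable (Spec_divide_students_into_sections students class_strength out) := by unfold Spec_divide_students_into_sections; infer_instance

-- ===== CLAIM (what is proved, stated in full; the proofs are below) =====
def Claim_equal_divide_students_into_sections : Prop := ∀ (students : List (List (String × Int))) (class_strength : Int), Dom_divide_students_into_sections students class_strength → Pre_divide_students_into_sections students class_strength → Spec_divide_students_into_sections students class_strength (divide_students_into_sections students class_strength)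

-- ===== LEMMAS AND PROOFS =====

-- greedy fixed-size chunking of a list (proof-side characterisation both ports reach)
def pvChunks {α : Type} (k : Nat) (l : List α) : List (List α) :=
  if l = [] ∨ k = 0 then [] else l.take k :: pvChunks k (l.drop k)
termination_by l.length
decreasing_by
  rename_i h
  rw [not_or] at h
  have h1 : l ≠ [] := h.1
  have h2 : k ≠ 0 := h.2
  have : 0 < l.length := List.length_pos_of_ne_nil h1
  simp only [List.length_drop]
  omega

lemma pvChunks_nil {α : Type} (k : Nat) : pvChunks (α := α) k [] = [] := by
  unfold pvChunks; simp

lemma pvChunks_cons {α : Type} (k : Nat) (l : List α) (hl : l ≠ []) (hk : k ≠ 0) :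
    pvChunks k l = l.take k :: pvChunks k (l.drop k) := by
  rw [pvChunks]; simp [hl, hk]

-- A's trailing "if current_section: sections.append(...)" step
def pvFinish (st : List (List (List (String × Int))) × List (List (String × Int))) :
    List (List (List (String × Int))) :=
  if st.2 = [] then st.1 else st.1 ++ [st.2]

-- A's accumulator step
def pvStepA (cs : Int) (acc : List (List (List (String × Int))) × List (List (String × Int)))
    (student : List (String × Int)) :
    List (List (List (String × Int))) × List (List (String × Int)) :=
  if (((acc.2 ++ [student]).length : Int) = cs) then
    (acc.1 ++ [acc.2 ++ [student]], [])
  else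
    (acc.1, acc.2 ++ [student])

lemma pvFoldA_nonpos (cs : Int) (hcs : cs ≤ 0) (l : List (List (String × Int))) :
    ∀ secs cur, l.foldl (pvStepA cs) (secs, cur) = (secs, cur ++ l) := by
  induction l with
  | nil => intro secs cur; simp
  | cons x t ih =>
    intro secs cur
    have hne : ¬ ((((cur ++ [x]).length : Int) = cs)) := by
      simp only [List.length_append, List.length_singleton]
      push_cast; omega
    simp only [List.foldl_cons, pvStepA, if_neg hne]
    rw [ih]
    simp

lemma pvFoldA_pos (k : Nat) (hk : 0 < k) (l : List (List (String × Int))) :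
    ∀ secs cur, cur.length < k →
      pvFinish (l.foldl (pvStepA (k : Int)) (secs, cur))
        = secs ++ pvChunks k (cur ++ l) := by
  induction l with
  | nil =>
    intro secs cur hcur
    simp only [List.foldl_nil, List.append_nil, pvFinish]
    by_cases h : cur = []
    · subst h; simp [pvChunks_nil]
    · rw [pvChunks_cons k cur h (by omega)]
      have ht : cur.take k = cur := List.take_of_length_le (by omega)
      have hd : cur.drop k = [] := List.drop_eq_nil_of_le (by omega)
      simp [h, ht, hd, pvChunks_nil]
  | cons x t ih =>
    intro secs cur hcur
    by_cases h : (((cur ++ [x]).length : Int) = (k : Int))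
    · have hlen : (cur ++ [x]).length = k := by exact_mod_cast h
      simp only [List.foldl_cons, pvStepA, if_pos h]
      rw [ih (secs ++ [cur ++ [x]]) [] (by simpa using hk)]
      have hflat : cur ++ x :: t = (cur ++ [x]) ++ t := by simp
      rw [hflat, pvChunks_cons k ((cur ++ [x]) ++ t) (by simp) (by omega)]
      rw [← hlen]
      rw [List.take_left, List.drop_left]
      simp
    · have hlt : (cur ++ [x]).length < k := by
        have : (cur ++ [x]).length ≠ k := fun hh => h (by exact_mod_cast hh)
        simp only [List.length_append, List.length_singleton] at this ⊢
        omega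
      simp only [List.foldl_cons, pvStepA, if_neg h]
      rw [ih secs (cur ++ [x]) hlt]
      simp

-- pyRange with a positive step: nil and cons forms
lemma pvPyRange_pos_nil (a b s : Int) (hs : 0 < s) (hab : b ≤ a) :
    PySem.List.pyRange a b s = [] := by
  rw [PySem.List.pyRange_of_pos a b hs]
  simp [show ¬ a < b by omega]

lemma pvPyRange_pos_cons (a b s : Int) (hs : 0 < s) (hab : a < b) :
    PySem.List.pyRange a b s = a :: PySem.List.pyRange (a + s) b s := by
  rw [PySem.List.pyRange_of_pos a b hs, PySem.List.pyRange_of_pos (a + s) b hs]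
  have hs0 : s ≠ 0 := by omega
  have hstep : (b - a + s - 1) / s = (b - a - 1) / s + 1 := by
    have := Int.add_mul_ediv_right (b - a - 1) 1 hs0
    simpa [one_mul] using (by rw [show b - a + s - 1 = b - a - 1 + 1 * s by ring, this])
  have hnn : 0 ≤ (b - a - 1) / s := Int.ediv_nonneg (by omega) (by omega)
  by_cases hc : a + s < b
  · have hcount : ((b - a + s - 1) / s).toNat = ((b - (a + s) + s - 1) / s).toNat + 1 := by
      have : b - (a + s) + s - 1 = b - a - 1 := by ring
      rw [this, hstep]; omega
    simp only [if_pos hab, if_pos hc, hcount, List.range_succ_eq_map]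
    simp only [List.map_cons, List.map_map]
    congr 1
    · push_cast; ring
    · apply List.map_congr_left
      intro m _
      simp only [Function.comp_apply]
      push_cast [Nat.succ_eq_add_one]
      ring
  · have hz : (b - a - 1) / s = 0 := Int.ediv_eq_zero_of_lt (by omega) (by omega)
    have hcount : ((b - a + s - 1) / s).toNat = 1 := by rw [hstep, hz]; rfl
    simp only [if_pos hab, if_neg hc, hcount]
    simp

-- B's range/slice pass computes greedy chunks of the suffix from a
lemma pvMapSliceFrom (s : Int) (hs : 0 < s) (l : List (List (String × Int))) :
    ∀ (m a : Nat), l.length - a ≤ m →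
      (PySem.List.pyRange (a : Int) (l.length : Int) s).map
          (fun i => PySem.List.slice l (some i) (some (i + s)))
        = pvChunks s.toNat (l.drop a) := by
  intro m
  induction m with
  | zero =>
    intro a ha
    rw [pvPyRange_pos_nil _ _ _ hs (by exact_mod_cast Nat.le_of_sub_eq_zero (by omega))]
    rw [List.drop_eq_nil_of_le (by omega), pvChunks_nil]
    simp
  | succ m ih =>
    intro a ha
    by_cases hlt : a < l.length
    · have hscast : s = ((s.toNat : Nat) : Int) := (Int.toNat_of_nonneg hs.le).symm
      have hk : s.toNat ≠ 0 := by omega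
      rw [pvPyRange_pos_cons _ _ _ hs (by exact_mod_cast hlt)]
      simp only [List.map_cons]
      have hhead : PySem.List.slice l (some (a : Int)) (some ((a : Int) + s))
          = (l.drop a).take s.toNat := by
        rw [hscast]
        exact PySem.List.slice_natCast_add l a s.toNat
      have hshift : (a : Int) + s = ((a + s.toNat : Nat) : Int) := by
        push_cast; omega
      rw [hhead, hshift, ih (a + s.toNat) (by omega)]
      rw [pvChunks_cons s.toNat (l.drop a) (by simp [List.drop_eq_nil_iff]; omega) hk]
      rw [List.drop_drop]
    · rw [pvPyRange_pos_nil _ _ _ hs (by exact_mod_cast Nat.le_of_not_lt hlt)]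
      rw [List.drop_eq_nil_of_le (by omega), pvChunks_nil]
      simp

-- ===== VERDICT (by name: the statement is the Claim_ definition above) =====
theorem divide_students_into_sections_spec : Claim_equal_divide_students_into_sections := by
  intro students class_strength _hdom _hpre
  unfold Spec_divide_students_into_sections
  unfold divide_students_into_sections divide_students_into_sections_alt
  simp only []
  set l : List (List (String × Int)) := (PySem.Dict.values (pvGroupByScore students)).flatten with hl
  have hfold : (PySem.Dict.values (pvGroupByScore students)).foldl
      (fun acc score_group => score_group.foldl (pvStepA class_strength) acc)
      (([], []) : List (List (List (String × Int))) × List (List (String × Int)))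
      = l.foldl (pvStepA class_strength) ([], []) := by
    rw [hl, List.foldl_flatten]
  by_cases hcs : class_strength ≤ 0
  · rw [if_pos hcs]
    show pvFinish
        ((PySem.Dict.values (pvGroupByScore students)).foldl
          (fun acc score_group => score_group.foldl (pvStepA class_strength) acc) ([], []))
      = (if l = [] then [] else [l])
    rw [hfold, pvFoldA_nonpos class_strength hcs l [] []]
    simp [pvFinish]
  · have hpos : 0 < class_strength := by omega
    rw [if_neg (show ¬ class_strength ≤ 0 by omega)]
    have hk : class_strength = ((class_strength.toNat : Nat) : Int) :=
      (Int.toNat_of_nonneg hpos.le).symm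
    show pvFinish
        ((PySem.Dict.values (pvGroupByScore students)).foldl
          (fun acc score_group => score_group.foldl (pvStepA class_strength) acc) ([], []))
      = (PySem.List.pyRange 0 (PySem.List.len l) class_strength).map
          (fun i => PySem.List.slice l (some i) (some (i + class_strength)))
    rw [hfold]
    have hA := pvFoldA_pos class_strength.toNat (by omega) l [] [] (by simp; omega)
    rw [← hk] at hA
    have hB := pvMapSliceFrom class_strength hpos l l.length 0 (by omega)
    simp only [Nat.cast_zero, List.drop_zero] at hB
    rw [PySem.List.len_eq, hB, hA]
    simp
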